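-- pv_equiv track=rewrite | github.com/genta-kawabata/at-coder | abc186/d/main.py | _get_answer_cumulative
-- ===== SOURCE A (Python) =====
-- from typing import List
--
-- def get_cumulative_sum_sequential(numbers: List[int]):
--     """forで累積和を求める。
--     This method works.
--     """
--     result: List[int] = [0]
--
--     for number in numbers:
--         result.append(result[-1] + number)
--
--     return result
--
-- def _get_answer_cumulative(l_a: List[int]):
--     """累積和で答えを求める。
--     O(N*logN)
--     """
--     n = len(l_a)
--     l_c = get_cumulative_sum_sequential(l_a)
--
--     # (N-1) * C_N+1
--     ans1 = (n - 1) * l_c[-1]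
--
--     # sigma{i=1>N-1}{C_i + (N-i) * A_i}
--     ans2 = 0
--     for i in range(n - 1):
--         ans2 += l_c[i] + (n - i) * l_a[i]
--
--     return ans1 - ans2
-- ===== SOURCE B (Python) =====
-- from typing import List
--
-- def _get_answer_cumulative(l_a: List[int]):
--     """Closed form: each element's total contribution is (2*i - (n-1)) * a."""
--     n = len(l_a)
--     return sum((2 * i - (n - 1)) * a for i, a in enumerate(l_a))
-- ===== Notes on version B (the rewrite author's own statement) =====
-- stated objective: simpler
-- what changed: Replaced the cumulative-sum list plus second indexed loop by a single pass summing each element's closed-form contribution (2*i-(n-1))*a_i.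
import Mathlib
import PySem

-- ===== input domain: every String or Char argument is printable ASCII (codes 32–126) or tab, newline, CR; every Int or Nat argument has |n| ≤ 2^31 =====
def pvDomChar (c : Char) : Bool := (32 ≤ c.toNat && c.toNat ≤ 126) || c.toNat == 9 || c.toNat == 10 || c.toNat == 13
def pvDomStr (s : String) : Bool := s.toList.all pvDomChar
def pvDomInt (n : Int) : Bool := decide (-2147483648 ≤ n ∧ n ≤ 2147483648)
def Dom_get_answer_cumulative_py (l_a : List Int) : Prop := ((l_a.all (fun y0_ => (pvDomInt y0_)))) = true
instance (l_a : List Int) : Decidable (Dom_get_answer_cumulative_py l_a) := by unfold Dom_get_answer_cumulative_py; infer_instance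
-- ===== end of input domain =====

-- B replaces A's prefix-sum list and second indexed loop by one pass with the closed-form coefficient (2*i-(n-1)); objective: simpler.

-- ===== PORT A =====
-- result[-1] is always defined (result starts as [0]), so the default of pyGetD is never used
def get_cumulative_sum_sequential (numbers : List Int) : List Int :=
  numbers.foldl (fun result number => result ++ [PySem.List.pyGetD result (-1) 0 + number]) [0]

def get_answer_cumulative_py (l_a : List Int) : Int :=
  let n : Int := l_a.length
  let l_c := get_cumulative_sum_sequential l_a
  let ans1 := (n - 1) * PySem.List.pyGetD l_c (-1) 0
  let ans2 := (PySem.List.pyRange 0 (n - 1) 1).foldl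
      (fun acc i => acc + (PySem.List.pyGetD l_c i 0 + (n - i) * PySem.List.pyGetD l_a i 0)) 0
  ans1 - ans2

-- ===== PORT B =====
def get_answer_cumulative_py_alt (l_a : List Int) : Int :=
  let n : Int := l_a.length
  ((PySem.List.enumerate l_a 0).map (fun p => (2 * p.1 - (n - 1)) * p.2)).sum

-- ===== PRECONDITION & SPEC =====
def Spec_get_answer_cumulative_py (l_a : List Int) (out : Int) : Prop := out = get_answer_cumulative_py_alt l_a
instance (l_a : List Int) (out : Int) : Decidable (Spec_get_answer_cumulative_py l_a out) := by unfold Spec_get_answer_cumulative_py; infer_instance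

-- ===== CLAIM (what is proved, stated in full; the proofs are below) =====
def Claim_equal_get_answer_cumulative_py : Prop := ∀ (l_a : List Int), Dom_get_answer_cumulative_py l_a → Spec_get_answer_cumulative_py l_a (get_answer_cumulative_py l_a)

-- ===== LEMMAS AND PROOFS =====

-- running prefix sums starting at s: csum s [a,b,...] = [s, s+a, s+a+b, ...]
def csum : Int → List Int → List Int
  | s, [] => [s]
  | s, x :: t => s :: csum (s + x) t

theorem csum_ne_nil (s : Int) (l : List Int) : csum s l ≠ [] := by
  cases l <;> simp [csum]

theorem foldl_cum (l : List Int) : ∀ (ys : List Int) (s : Int),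
    l.foldl (fun r x => r ++ [PySem.List.pyGetD r (-1) 0 + x]) (ys ++ [s]) = ys ++ csum s l := by
  induction l with
  | nil => intro ys s; simp [csum]
  | cons x t ih =>
      intro ys s
      simp only [List.foldl_cons, PySem.List.pyGetD_neg_one_append_singleton]
      have h : ys ++ [s] ++ [s + x] = (ys ++ [s]) ++ [s + x] := by simp
      rw [h, ih (ys ++ [s]) (s + x)]
      simp [csum]

theorem cum_eq (l : List Int) : get_cumulative_sum_sequential l = csum 0 l := by
  have h := foldl_cum l [] 0
  simpa [get_cumulative_sum_sequential] using h

theorem csum_getLast? (l : List Int) : ∀ s, (csum s l).getLast? = some (s + l.sum) := by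
  induction l with
  | nil => intro s; simp [csum]
  | cons x t ih =>
      intro s
      simp [csum, List.getLast?_cons, ih (s + x)]
      ring

theorem csum_last (l : List Int) (s : Int) :
    PySem.List.pyGetD (csum s l) (-1) 0 = s + l.sum := by
  have h := csum_getLast? l s
  rw [List.getLast?_eq_some_getLast (csum_ne_nil s l)] at h
  rw [PySem.List.pyGetD_neg_one (csum s l) 0 (csum_ne_nil s l)]
  exact Option.some.inj h

theorem csum_getD (l : List Int) : ∀ (s : Int) (k : Nat), k ≤ l.length →
    (csum s l).getD k 0 = s + (l.take k).sum := by
  induction l with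
  | nil =>
      intro s k hk
      have hk0 : k = 0 := by simpa using hk
      subst hk0; simp [csum]
  | cons x t ih =>
      intro s k hk
      cases k with
      | zero => simp [csum]
      | succ m =>
          simp only [csum, List.getD_cons_succ, List.take_succ_cons, List.sum_cons]
          rw [ih (s + x) m (by simpa using hk)]
          ring

theorem sum_take (l : List Int) : ∀ (m : Nat), m ≤ l.length →
    (l.take m).sum = ∑ j ∈ Finset.range m, l.getD j 0 := by
  intro m hm
  induction m with
  | zero => simp
  | succ k ih =>
      have hk : k < l.length := by omega
      rw [Finset.sum_range_succ, ← ih (by omega), List.sum_take_succ l k hk]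
      simp [List.getD, List.getElem?_eq_getElem hk]

theorem whole_sum (l : List Int) : l.sum = ∑ j ∈ Finset.range l.length, l.getD j 0 := by
  have h := sum_take l l.length le_rfl
  simpa using h

theorem take_sum_swap (l : List Int) (m : Nat) (hm : m ≤ l.length) :
    ∑ i ∈ Finset.range m, (l.take i).sum
      = ∑ j ∈ Finset.range m, ((m : Int) - 1 - j) * l.getD j 0 := by
  induction m with
  | zero => simp
  | succ k ih =>
      rw [Finset.sum_range_succ, ih (by omega), sum_take l k (by omega),
        ← Finset.sum_add_distrib, Finset.sum_range_succ]
      push_cast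
      rw [show ((k : Int) + 1 - 1 - (k : Int)) * l.getD k 0 = 0 by ring, add_zero]
      refine Finset.sum_congr rfl fun j hj => ?_
      ring

-- bridge: a sum over List.range IS the Finset.range sum (definitional)
theorem list_range_sum (n : Nat) (f : Nat → Int) :
    ((List.range n).map f).sum = ∑ i ∈ Finset.range n, f i := rfl

theorem enum_sum (c : Int) (l : List Int) : ∀ (s : Int),
    ((PySem.List.enumerate l s).map (fun p => (2 * p.1 - c) * p.2)).sum
      = ∑ k ∈ Finset.range l.length, (2 * (s + k) - c) * l.getD k 0 := by
  induction l with
  | nil => intro s; simp [PySem.List.enumerate_nil]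
  | cons x t ih =>
      intro s
      rw [PySem.List.enumerate_cons]
      simp only [List.map_cons, List.sum_cons, ih (s + 1), List.length_cons]
      rw [Finset.sum_range_succ']
      simp only [List.getD_cons_succ, List.getD_cons_zero, Nat.cast_add, Nat.cast_one,
        Nat.cast_zero]
      have h2 : ∀ j ∈ Finset.range t.length,
          (2 * (s + 1 + (j : Int)) - c) * t.getD j 0
            = (2 * (s + ((j : Int) + 1)) - c) * t.getD j 0 := fun j _ => by ring
      rw [Finset.sum_congr rfl h2]
      ring

-- ===== VERDICT (by name: the statement is the Claim_ definition above) =====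
theorem get_answer_cumulative_py_spec : Claim_equal_get_answer_cumulative_py := by
  intro l_a _
  unfold Spec_get_answer_cumulative_py
  simp only [get_answer_cumulative_py, get_answer_cumulative_py_alt]
  rw [cum_eq, csum_last, enum_sum]
  cases l_a with
  | nil =>
      rw [PySem.List.pyRange_one_eq_nil (by norm_num)]
      simp
  | cons x t =>
      have hrange : PySem.List.pyRange 0 (((x :: t).length : Int) - 1) 1
          = (List.range t.length).map (fun k : Nat => (k : Int)) := by
        rw [PySem.List.pyRange_one]
        have h1 : ((((x :: t).length : Int)) - 1 - 0).toNat = t.length := by simp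
        rw [h1]
        exact List.map_congr_left fun k _ => zero_add (k : Int)
      rw [PySem.List.foldl_add (g := fun i =>
        PySem.List.pyGetD (csum 0 (x :: t)) i 0
          + (((x :: t).length : Int) - i) * PySem.List.pyGetD (x :: t) i 0)]
      rw [hrange, List.map_map, list_range_sum]
      simp only [Function.comp_def]
      have hterm : ∀ k ∈ Finset.range t.length,
          PySem.List.pyGetD (csum 0 (x :: t)) (k : Int) 0
            + (((x :: t).length : Int) - (k : Int)) * PySem.List.pyGetD (x :: t) (k : Int) 0
          = ((x :: t).take k).sum + (((x :: t).length : Int) - (k : Int)) * (x :: t).getD k 0 := by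
        intro k hk
        have hk' : k ≤ (x :: t).length := by simp at hk; simp; omega
        rw [PySem.List.pyGetD_natCast, PySem.List.pyGetD_natCast, csum_getD _ 0 k hk']
        ring
      rw [Finset.sum_congr rfl hterm, Finset.sum_add_distrib,
        take_sum_swap (x :: t) t.length (by simp), whole_sum]
      simp only [List.length_cons, Finset.sum_range_succ]
      push_cast
      have hper : ∑ j ∈ Finset.range t.length,
          (((t.length : Int) + 1 - 1) * (x :: t).getD j 0
            - ((((t.length : Int)) - 1 - (j : Int)) * (x :: t).getD j 0
                + (((t.length : Int)) + 1 - (j : Int)) * (x :: t).getD j 0)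
            - (2 * ((0 : Int) + (j : Int)) - (((t.length : Int)) + 1 - 1)) * (x :: t).getD j 0)
          = 0 := Finset.sum_eq_zero fun j _ => by ring
      rw [Finset.sum_sub_distrib, Finset.sum_sub_distrib, Finset.sum_add_distrib] at hper
      linear_combination hper + Finset.mul_sum (Finset.range t.length)
        (fun j => (x :: t).getD j 0) (((t.length : Int)) + 1 - 1)
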